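-- pv_equiv track=rewrite | github.com/yu-hao123/async-classifier | asynchrony/classifier.py | find_early_cycling
-- ===== SOURCE A (Python) =====
-- def find_early_cycling(ins_marks, exp_marks, pmus_start_marks, pmus_peak_marks):
--     indexes = []
--     for i in range(len(pmus_start_marks)):
--         for j in range(len(exp_marks)):
--             if (exp_marks[j] <= pmus_peak_marks[i] and exp_marks[j] >= pmus_start_marks[i]):
--                 if (ins_marks[j] <= pmus_peak_marks[i] and ins_marks[j] >= pmus_start_marks[i]):
--                     indexes.append(pmus_start_marks[i])
--     return indexes
-- ===== SOURCE B (Python) =====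
-- def find_early_cycling(ins_marks, exp_marks, pmus_start_marks, pmus_peak_marks):
--     # Sort the (max, min) envelope of each mark pair by its upper end once, then
--     # answer each breath interval with an early-terminating scan of that order.
--     pts = sorted(((max(e, n), min(e, n)) for e, n in zip(exp_marks, ins_marks)),
--                  key=lambda t: t[0])
--     out = []
--     for s, p in zip(pmus_start_marks, pmus_peak_marks):
--         cnt = 0
--         for hi, lo in pts:
--             if hi > p:
--                 break
--             if lo >= s:
--                 cnt += 1
--         out += [s] * cnt
--     return out
-- ===== Notes on version B (the rewrite author's own statement) =====
-- stated objective: alternative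
-- what changed: B replaces A's full nested rescans of exp/ins marks per interval by mapping each mark pair once to its (max,min) envelope, sorting these envelopes by upper end, and answering each breath interval with an early-terminating scan of that sorted order, emitting the start repeated count times.
-- outside the precondition, e.g. on find_early_cycling([], [0], [0], [0]): A raises IndexError, B returns []; on find_early_cycling([0], [0], [0], []): A raises IndexError, B returns []
import Mathlib
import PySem

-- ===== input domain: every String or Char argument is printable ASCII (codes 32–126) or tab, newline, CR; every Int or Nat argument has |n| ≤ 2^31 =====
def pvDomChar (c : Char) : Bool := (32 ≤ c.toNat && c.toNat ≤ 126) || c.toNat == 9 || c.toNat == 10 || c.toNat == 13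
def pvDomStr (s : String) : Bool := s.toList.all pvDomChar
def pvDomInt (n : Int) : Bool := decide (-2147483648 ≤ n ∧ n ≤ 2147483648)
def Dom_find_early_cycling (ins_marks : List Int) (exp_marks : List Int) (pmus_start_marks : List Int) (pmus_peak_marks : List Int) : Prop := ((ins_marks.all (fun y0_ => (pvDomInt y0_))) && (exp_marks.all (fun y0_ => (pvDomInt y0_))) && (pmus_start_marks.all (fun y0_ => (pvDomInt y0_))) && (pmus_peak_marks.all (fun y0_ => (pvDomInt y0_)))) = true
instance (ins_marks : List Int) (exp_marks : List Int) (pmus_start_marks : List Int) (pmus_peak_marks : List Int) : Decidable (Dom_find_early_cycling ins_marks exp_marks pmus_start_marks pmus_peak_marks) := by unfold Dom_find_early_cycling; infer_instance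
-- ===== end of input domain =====

-- B replaces A's nested index scan by sorting the (max,min) envelopes of the mark pairs by
-- their upper end once and answering each breath interval with an early-terminating scan
-- of that sorted order (objective: alternative algorithm, prunes instead of full rescans).

-- ===== PORT A =====
def find_early_cycling (ins_marks : List Int) (exp_marks : List Int) (pmus_start_marks : List Int) (pmus_peak_marks : List Int) : List Int :=
  (PySem.List.pyRange 0 (pmus_start_marks.length : Int) 1).foldl (fun indexes i =>
    (PySem.List.pyRange 0 (exp_marks.length : Int) 1).foldl (fun indexes j =>
      if PySem.List.pyGetD exp_marks j 0 ≤ PySem.List.pyGetD pmus_peak_marks i 0 ∧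
         PySem.List.pyGetD exp_marks j 0 ≥ PySem.List.pyGetD pmus_start_marks i 0 then
        if PySem.List.pyGetD ins_marks j 0 ≤ PySem.List.pyGetD pmus_peak_marks i 0 ∧
           PySem.List.pyGetD ins_marks j 0 ≥ PySem.List.pyGetD pmus_start_marks i 0 then
          indexes ++ [PySem.List.pyGetD pmus_start_marks i 0]
        else indexes
      else indexes) indexes) []

-- ===== PORT B =====
-- the inner 'for … if hi > p: break … if lo >= s: cnt += 1' loop of Source B
def pvCntLoop (s p : Int) : List (Int × Int) → Nat → Nat
  | [], cnt => cnt
  | (hi, lo) :: rest, cnt =>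
    if p < hi then cnt
    else pvCntLoop s p rest (if s ≤ lo then cnt + 1 else cnt)

def find_early_cycling_alt (ins_marks : List Int) (exp_marks : List Int) (pmus_start_marks : List Int) (pmus_peak_marks : List Int) : List Int :=
  let pts := PySem.List.sorted
    ((exp_marks.zip ins_marks).map (fun t => (max t.1 t.2, min t.1 t.2))) (fun t => t.1)
  (pmus_start_marks.zip pmus_peak_marks).foldl
    (fun out q => out ++ List.replicate (pvCntLoop q.1 q.2 pts 0) q.1) []

-- ===== PRECONDITION & SPEC =====
-- Pre_ excludes exactly the inputs where A raises IndexError: pmus_peak_marks shorter than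
-- pmus_start_marks while exp_marks is non-empty, or an exp mark inside some interval at an
-- index beyond the end of ins_marks.
def Pre_find_early_cycling (ins_marks : List Int) (exp_marks : List Int) (pmus_start_marks : List Int) (pmus_peak_marks : List Int) : Prop :=
  (exp_marks ≠ [] → pmus_start_marks.length ≤ pmus_peak_marks.length) ∧
  ∀ i < pmus_start_marks.length, ∀ j < exp_marks.length,
    pmus_start_marks.getD i 0 ≤ exp_marks.getD j 0 ∧ exp_marks.getD j 0 ≤ pmus_peak_marks.getD i 0 →
    j < ins_marks.length
instance (ins_marks : List Int) (exp_marks : List Int) (pmus_start_marks : List Int) (pmus_peak_marks : List Int) : Decidable (Pre_find_early_cycling ins_marks exp_marks pmus_start_marks pmus_peak_marks) := by unfold Pre_find_early_cycling; infer_instance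

def pvWitness_find_early_cycling : List Int × List Int × List Int × List Int := ([0, 2], [1, 9], [0, 5], [3, 6])

def Spec_find_early_cycling (ins_marks : List Int) (exp_marks : List Int) (pmus_start_marks : List Int) (pmus_peak_marks : List Int) (out : List Int) : Prop := out = find_early_cycling_alt ins_marks exp_marks pmus_start_marks pmus_peak_marks
instance (ins_marks : List Int) (exp_marks : List Int) (pmus_start_marks : List Int) (pmus_peak_marks : List Int) (out : List Int) : Decidable (Spec_find_early_cycling ins_marks exp_marks pmus_start_marks pmus_peak_marks out) := by unfold Spec_find_early_cycling; infer_instance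

-- ===== CLAIM (what is proved, stated in full; the proofs are below) =====
def Claim_equal_find_early_cycling : Prop := ∀ (ins_marks : List Int) (exp_marks : List Int) (pmus_start_marks : List Int) (pmus_peak_marks : List Int), Dom_find_early_cycling ins_marks exp_marks pmus_start_marks pmus_peak_marks → Pre_find_early_cycling ins_marks exp_marks pmus_start_marks pmus_peak_marks → Spec_find_early_cycling ins_marks exp_marks pmus_start_marks pmus_peak_marks (find_early_cycling ins_marks exp_marks pmus_start_marks pmus_peak_marks)

-- ===== LEMMAS AND PROOFS =====

-- the combined success condition of A's two nested ifs, at indices (i, j)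
def condA (ins_marks exp_marks pmus_start_marks pmus_peak_marks : List Int) (i j : Nat) : Bool :=
  decide (exp_marks.getD j 0 ≤ pmus_peak_marks.getD i 0 ∧ pmus_start_marks.getD i 0 ≤ exp_marks.getD j 0 ∧
          ins_marks.getD j 0 ≤ pmus_peak_marks.getD i 0 ∧ pmus_start_marks.getD i 0 ≤ ins_marks.getD j 0)

-- the membership test B runs against interval (s, p), on an envelope point (hi, lo)
def condB (s p : Int) (t : Int × Int) : Bool := decide (t.1 ≤ p ∧ s ≤ t.2)

lemma foldl_double_if {α : Type} (c1 c2 : α → Prop) [DecidablePred c1] [DecidablePred c2]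
    (v : Int) (l : List α) (acc : List Int) :
    l.foldl (fun a x => if c1 x then (if c2 x then a ++ [v] else a) else a) acc
      = acc ++ List.replicate (l.countP (fun x => decide (c1 x) && decide (c2 x))) v := by
  induction l generalizing acc with
  | nil => simp
  | cons h t ih =>
    simp only [List.foldl_cons, List.countP_cons, ih]
    by_cases h1 : c1 h <;> by_cases h2 : c2 h <;>
      simp [h1, h2, List.replicate_succ', List.append_assoc] <;>
      rw [← List.replicate_succ, List.replicate_succ']

lemma foldl_append_flatMap {α β : Type} (g : α → List β) (l : List α) (acc : List β) :
    l.foldl (fun a x => a ++ g x) acc = acc ++ l.flatMap g := by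
  induction l generalizing acc with
  | nil => simp
  | cons h t ih => simp [ih, List.append_assoc]

lemma flatMap_const_nil {α β : Type} (l : List α) : l.flatMap (fun _ => ([] : List β)) = [] := by
  induction l <;> simp [*]

-- A computed in closed form: per interval i, its start repeated once per matching mark index j
lemma A_char (ins_marks exp_marks pmus_start_marks pmus_peak_marks : List Int) :
    find_early_cycling ins_marks exp_marks pmus_start_marks pmus_peak_marks
      = (List.range pmus_start_marks.length).flatMap (fun i =>
          List.replicate ((List.range exp_marks.length).countP
              (condA ins_marks exp_marks pmus_start_marks pmus_peak_marks i))
            (pmus_start_marks.getD i 0)) := by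
  unfold find_early_cycling
  rw [PySem.List.pyRange_one, PySem.List.pyRange_one]
  simp only [Int.sub_zero, Int.toNat_natCast, zero_add, List.foldl_map,
    PySem.List.pyGetD_natCast, ge_iff_le]
  have hinner : ∀ (i : Nat) (acc : List Int),
      (List.range exp_marks.length).foldl (fun a j =>
        if exp_marks.getD j 0 ≤ pmus_peak_marks.getD i 0 ∧ pmus_start_marks.getD i 0 ≤ exp_marks.getD j 0 then
          if ins_marks.getD j 0 ≤ pmus_peak_marks.getD i 0 ∧ pmus_start_marks.getD i 0 ≤ ins_marks.getD j 0 then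
            a ++ [pmus_start_marks.getD i 0] else a else a) acc
      = acc ++ List.replicate ((List.range exp_marks.length).countP
          (condA ins_marks exp_marks pmus_start_marks pmus_peak_marks i)) (pmus_start_marks.getD i 0) := by
    intro i acc
    rw [foldl_double_if
      (fun j => exp_marks.getD j 0 ≤ pmus_peak_marks.getD i 0 ∧ pmus_start_marks.getD i 0 ≤ exp_marks.getD j 0)
      (fun j => ins_marks.getD j 0 ≤ pmus_peak_marks.getD i 0 ∧ pmus_start_marks.getD i 0 ≤ ins_marks.getD j 0)]
    have hfun : (fun j : Nat =>
        decide (exp_marks.getD j 0 ≤ pmus_peak_marks.getD i 0 ∧ pmus_start_marks.getD i 0 ≤ exp_marks.getD j 0) &&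
        decide (ins_marks.getD j 0 ≤ pmus_peak_marks.getD i 0 ∧ pmus_start_marks.getD i 0 ≤ ins_marks.getD j 0))
        = condA ins_marks exp_marks pmus_start_marks pmus_peak_marks i := by
      funext j
      simp only [condA]
      rw [Bool.eq_iff_iff]
      simp only [Bool.and_eq_true, decide_eq_true_eq]
      tauto
    rw [hfun]
  simp only [hinner]
  rw [foldl_append_flatMap]
  simp

-- B computed in closed form
lemma B_char (ins_marks exp_marks pmus_start_marks pmus_peak_marks : List Int) :
    find_early_cycling_alt ins_marks exp_marks pmus_start_marks pmus_peak_marks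
      = (pmus_start_marks.zip pmus_peak_marks).flatMap (fun q =>
          List.replicate (pvCntLoop q.1 q.2 (PySem.List.sorted
            ((exp_marks.zip ins_marks).map (fun t => (max t.1 t.2, min t.1 t.2))) (fun t => t.1)) 0) q.1) := by
  unfold find_early_cycling_alt
  rw [foldl_append_flatMap]
  simp

-- the break-loop counts exactly the points satisfying condB, on a list sorted by first component
lemma cntLoop_eq_countP (s p : Int) (l : List (Int × Int))
    (hs : l.Pairwise (fun a b => a.1 ≤ b.1)) (c : Nat) :
    pvCntLoop s p l c = c + l.countP (condB s p) := by
  induction l generalizing c with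
  | nil => simp [pvCntLoop]
  | cons h t ih =>
    obtain ⟨hi, lo⟩ := h
    rw [List.pairwise_cons] at hs
    simp only [pvCntLoop]
    by_cases hp : p < hi
    · rw [if_pos hp]
      have h0 : t.countP (condB s p) = 0 := by
        apply List.countP_eq_zero.mpr
        intro a ha
        simp only [condB, decide_eq_true_eq, not_and]
        intro hle
        exact absurd (le_trans (hs.1 a ha) hle) (not_le.mpr hp)
      have hhead : condB s p (hi, lo) = false := by
        simp only [condB]
        exact decide_eq_false (fun h => absurd h.1 (not_le.mpr hp))
      simp [h0, hhead]
    · rw [if_neg hp, ih hs.2]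
      rw [not_lt] at hp
      by_cases hl : s ≤ lo <;> simp [hl, condB, hp] <;> omega

lemma zip_eq_map_range (a b : List Int) :
    a.zip b = (List.range (min a.length b.length)).map (fun i => (a.getD i 0, b.getD i 0)) := by
  apply List.ext_getElem
  · simp
  · intro i h1 h2
    simp only [List.getElem_zip, List.getElem_map, List.getElem_range]
    have hia : i < a.length := lt_of_lt_of_le h1 (by simp)
    have hib : i < b.length := lt_of_lt_of_le h1 (by simp)
    rw [List.getD_eq_getElem a 0 hia, List.getD_eq_getElem b 0 hib]

-- the per-interval counts agree under Pre_
lemma count_eq (ins_marks exp_marks pmus_start_marks pmus_peak_marks : List Int)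
    (hpre : Pre_find_early_cycling ins_marks exp_marks pmus_start_marks pmus_peak_marks)
    (i : Nat) (hi : i < pmus_start_marks.length) :
    ((exp_marks.zip ins_marks).map (fun t => (max t.1 t.2, min t.1 t.2))).countP
        (condB (pmus_start_marks.getD i 0) (pmus_peak_marks.getD i 0))
      = (List.range exp_marks.length).countP
          (condA ins_marks exp_marks pmus_start_marks pmus_peak_marks i) := by
  rw [List.countP_map, zip_eq_map_range, List.countP_map]
  have hfun : ((condB (pmus_start_marks.getD i 0) (pmus_peak_marks.getD i 0) ∘
        fun t : Int × Int => (max t.1 t.2, min t.1 t.2)) ∘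
        fun j : Nat => (exp_marks.getD j 0, ins_marks.getD j 0))
      = condA ins_marks exp_marks pmus_start_marks pmus_peak_marks i := by
    funext j
    simp only [Function.comp_apply, condB, condA]
    rw [Bool.eq_iff_iff]
    simp only [decide_eq_true_eq]
    constructor
    · rintro ⟨hmax, hmin⟩
      rw [max_le_iff] at hmax
      rw [le_min_iff] at hmin
      exact ⟨hmax.1, hmin.1, hmax.2, hmin.2⟩
    · rintro ⟨h1, h2, h3, h4⟩
      exact ⟨max_le_iff.mpr ⟨h1, h3⟩, le_min_iff.mpr ⟨h2, h4⟩⟩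
  rw [hfun]
  rcases Nat.le_total exp_marks.length ins_marks.length with hle | hle
  · rw [Nat.min_eq_left hle]
  · rw [Nat.min_eq_right hle]
    have hsplit : exp_marks.length = ins_marks.length + (exp_marks.length - ins_marks.length) := by omega
    rw [hsplit, List.range_add, List.countP_append]
    have h0 : ((List.range (exp_marks.length - ins_marks.length)).map (fun k => ins_marks.length + k)).countP
        (condA ins_marks exp_marks pmus_start_marks pmus_peak_marks i) = 0 := by
      apply List.countP_eq_zero.mpr
      intro j hj
      simp only [List.mem_map, List.mem_range] at hj
      obtain ⟨k, hk, rfl⟩ := hj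
      simp only [condA, decide_eq_true_eq, not_and]
      intro hc1 hc2
      exfalso
      have := hpre.2 i hi (ins_marks.length + k) (by omega) ⟨hc2, hc1⟩
      omega
    omega

theorem main_eq (ins_marks exp_marks pmus_start_marks pmus_peak_marks : List Int)
    (hpre : Pre_find_early_cycling ins_marks exp_marks pmus_start_marks pmus_peak_marks) :
    find_early_cycling ins_marks exp_marks pmus_start_marks pmus_peak_marks
      = find_early_cycling_alt ins_marks exp_marks pmus_start_marks pmus_peak_marks := by
  rw [A_char, B_char]
  by_cases hexp : exp_marks = []
  · subst hexp
    simp [pvCntLoop, PySem.List.sorted, flatMap_const_nil]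
  · have hns : pmus_start_marks.length ≤ pmus_peak_marks.length := hpre.1 hexp
    rw [zip_eq_map_range pmus_start_marks pmus_peak_marks, Nat.min_eq_left hns, List.flatMap_map]
    apply List.flatMap_congr
    intro i hi
    rw [List.mem_range] at hi
    congr 1
    rw [cntLoop_eq_countP _ _ _ (PySem.List.sorted_pairwise _ _) 0, Nat.zero_add,
      (PySem.List.sorted_perm _ _ false).countP_eq,
      count_eq ins_marks exp_marks pmus_start_marks pmus_peak_marks hpre i hi]

-- ===== VERDICT (by name: the statement is the Claim_ definition above) =====
theorem find_early_cycling_spec : Claim_equal_find_early_cycling := by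
  intro ins_marks exp_marks pmus_start_marks pmus_peak_marks _ hpre
  unfold Spec_find_early_cycling
  exact main_eq ins_marks exp_marks pmus_start_marks pmus_peak_marks hpre
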